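-- pv_equiv track=rewrite | github.com/abdurrahmanadamu46-wq/open-claw-agent | dragon-senate-saas-v2/event_subjects.py | subject_matches
-- ===== SOURCE A (Python) =====
-- def subject_matches(pattern: str, subject: str) -> bool:
--     normalized_pattern = str(pattern or "").strip()
--     normalized_subject = str(subject or "").strip()
--     if not normalized_pattern or not normalized_subject:
--         return False
--     if normalized_pattern == normalized_subject:
--         return True
--     pattern_parts = normalized_pattern.split(".")
--     subject_parts = normalized_subject.split(".")
--     pi = 0
--     si = 0
--     while pi < len(pattern_parts) and si < len(subject_parts):
--         token = pattern_parts[pi]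
--         if token == ">":
--             return True
--         if token != "*" and token != subject_parts[si]:
--             return False
--         pi += 1
--         si += 1
--     if pi < len(pattern_parts) and pattern_parts[pi] == ">":
--         return True
--     return pi == len(pattern_parts) and si == len(subject_parts)
-- ===== SOURCE B (Python) =====
-- def subject_matches(pattern: str, subject: str) -> bool:
--     p = str(pattern or "").strip()
--     s = str(subject or "").strip()
--     if not p or not s:
--         return False
--     # Character-level state machine: scan the subject once, the state being
--     # (mode, remaining pattern); no splitting into token lists.
--     ALL, DEAD, STAR, LIT = 0, 1, 2, 3
--
--     def is_gt(q):
--         return q == ">" or q.startswith(">.")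
--
--     def enter(q):
--         if is_gt(q):
--             return (ALL, "")
--         if q == "*" or q.startswith("*."):
--             return (STAR, q[1:])
--         return (LIT, q)
--
--     st = enter(p)
--     for c in s:
--         m, r = st
--         if m == ALL or m == DEAD:
--             break
--         if m == STAR:
--             if c == ".":
--                 st = enter(r[1:]) if r.startswith(".") else (DEAD, "")
--         else:
--             if r and r[0] == c:
--                 st = enter(r[1:]) if c == "." else (LIT, r[1:])
--             else:
--                 st = (DEAD, "")
--     m, r = st
--     if m == ALL:
--         return True
--     if m == DEAD:
--         return False
--     if m == STAR:
--         return r == "" or is_gt(r[1:])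
--     return r == "" or (r[0] == "." and is_gt(r[1:]))
-- ===== Notes on version B (the rewrite author's own statement) =====
-- stated objective: alternative
-- what changed: A splits both strings into token lists and runs a two-pointer while-loop over the tokens (plus an equality shortcut); B never splits: it compiles nothing and instead scans the subject's characters once through a small state machine whose state is (mode, remaining pattern), with modes ALL/DEAD/STAR/LIT, deciding acceptance from the final state.
import Mathlib
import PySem

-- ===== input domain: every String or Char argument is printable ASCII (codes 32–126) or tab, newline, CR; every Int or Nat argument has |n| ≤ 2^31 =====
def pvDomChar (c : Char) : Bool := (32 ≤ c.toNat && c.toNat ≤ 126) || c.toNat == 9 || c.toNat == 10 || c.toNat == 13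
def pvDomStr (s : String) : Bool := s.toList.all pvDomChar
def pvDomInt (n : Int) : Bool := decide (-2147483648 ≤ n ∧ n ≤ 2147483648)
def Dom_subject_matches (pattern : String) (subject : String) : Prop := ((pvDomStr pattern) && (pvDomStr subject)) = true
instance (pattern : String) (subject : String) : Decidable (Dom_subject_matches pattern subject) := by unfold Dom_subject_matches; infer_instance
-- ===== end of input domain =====

-- B replaces A's split-into-token-lists + two-pointer while-loop by a single character-level
-- scan of the subject through a four-mode state machine over the remaining pattern; objective:
-- alternative (same cost, no splitting).

-- ===== PORT A =====
-- A's while loop: pi and si advance in step, so recurse on both token lists together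
def pvLoopA : List String → List String → Bool
  | t :: ps, u :: ss =>
      if t == ">" then true
      else if t != "*" && t != u then false
      else pvLoopA ps ss
  | t :: _, [] => t == ">"          -- after the loop: pi < len ∧ pattern_parts[pi] == ">" (else pi == len is false here)
  | [], ss => ss.isEmpty            -- pi == len; result is si == len

def subject_matches (pattern : String) (subject : String) : Bool :=
  let np := PySem.Str.strip pattern
  let ns := PySem.Str.strip subject
  if np == "" || ns == "" then false
  else if np == ns then true
  else
    -- '.split(".")': the separator is the nonempty literal ".", so split? is always some here
    let pp := (PySem.Str.split? np ".").getD []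
    let sp := (PySem.Str.split? ns ".").getD []
    pvLoopA pp sp

-- ===== PORT B =====
inductive PvMode where
  | all | dead | star | lit
  deriving DecidableEq, Repr

-- is_gt(q): q == ">" or q.startswith(">.")
def pvIsGt (q : List Char) : Bool :=
  q.head? == some '>' && (q.tail == [] || q.tail.head? == some '.')

-- enter(q): classify the pattern remainder at a token start
def pvEnter (q : List Char) : PvMode × List Char :=
  if pvIsGt q then (.all, [])
  else if q.head? == some '*' && (q.tail == [] || q.tail.head? == some '.') then (.star, q.tail)
  else (.lit, q)

-- one subject character against the state (mode, remaining pattern)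
def pvStepB (st : PvMode × List Char) (c : Char) : PvMode × List Char :=
  match st.1 with
  | .all => st
  | .dead => st
  | .star =>
      if c == '.' then
        (if st.2.head? == some '.' then pvEnter st.2.tail else (.dead, []))
      else st
  | .lit =>
      match st.2 with
      | [] => (.dead, [])
      | r0 :: r => if r0 == c then (if c == '.' then pvEnter r else (.lit, r)) else (.dead, [])

def pvAcceptB (st : PvMode × List Char) : Bool :=
  match st.1 with
  | .all => true
  | .dead => false
  | .star => st.2 == [] || pvIsGt st.2.tail
  | .lit => st.2 == [] || (st.2.head? == some '.' && pvIsGt st.2.tail)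

def subject_matches_alt (pattern : String) (subject : String) : Bool :=
  let p := PySem.Str.strip pattern
  let s := PySem.Str.strip subject
  if p == "" || s == "" then false
  else pvAcceptB (s.toList.foldl pvStepB (pvEnter p.toList))

-- ===== PRECONDITION & SPEC =====
def Spec_subject_matches (pattern : String) (subject : String) (out : Bool) : Prop := out = subject_matches_alt pattern subject
instance (pattern : String) (subject : String) (out : Bool) : Decidable (Spec_subject_matches pattern subject out) := by unfold Spec_subject_matches; infer_instance

-- ===== CLAIM (what is proved, stated in full; the proofs are below) =====
def Claim_equal_subject_matches : Prop := ∀ (pattern : String) (subject : String), Dom_subject_matches pattern subject → Spec_subject_matches pattern subject (subject_matches pattern subject)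

-- ===== LEMMAS AND PROOFS =====

-- char-level mirror of A's token loop
def pvLoopC : List (List Char) → List (List Char) → Bool
  | t :: ps, u :: ss =>
      if t = ['>'] then true
      else if t ≠ ['*'] ∧ t ≠ u then false
      else pvLoopC ps ss
  | t :: _, [] => t == ['>']
  | [], ss => ss.isEmpty

-- join token lists with '.'
def pvJoin : List (List Char) → List Char
  | [] => []
  | [t] => t
  | t :: ts => t ++ '.' :: pvJoin ts

theorem pvJoin_cons (t : List Char) (ts : List (List Char)) :
    pvJoin (t :: ts) = t ++ (if ts = [] then [] else '.' :: pvJoin ts) := by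
  cases ts <;> simp [pvJoin]

-- reference split on '.'
def pvSplit : List Char → List (List Char)
  | [] => [[]]
  | c :: rest => if c = '.' then [] :: pvSplit rest else (pvSplit rest).modifyHead (c :: ·)

theorem pvSplit_ne_nil (s : List Char) : pvSplit s ≠ [] := by
  induction s with
  | nil => simp [pvSplit]
  | cons c rest ih =>
    simp only [pvSplit]
    split_ifs
    · simp
    · cases h : pvSplit rest with
      | nil => exact absurd h ih
      | cons x xs => simp [List.modifyHead]

theorem pvSplit_dotfree (s : List Char) : ∀ t ∈ pvSplit s, '.' ∉ t := by
  induction s with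
  | nil => intro t ht; simp [pvSplit] at ht; simp [ht]
  | cons c rest ih =>
    intro t ht
    simp only [pvSplit] at ht
    split_ifs at ht with hc
    · rcases List.mem_cons.mp ht with rfl | ht'
      · simp
      · exact ih t ht'
    · cases h : pvSplit rest with
      | nil => exact absurd h (pvSplit_ne_nil rest)
      | cons x xs =>
        rw [h, List.modifyHead_cons] at ht
        rcases List.mem_cons.mp ht with rfl | ht'
        · simp only [List.mem_cons, not_or]
          exact ⟨fun h' => hc h'.symm, ih x (h ▸ List.mem_cons_self)⟩
        · exact ih t (h ▸ List.mem_cons_of_mem x ht')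

theorem pvJoin_modifyHead (c : Char) (x : List Char) (xs : List (List Char)) :
    pvJoin ((x :: xs).modifyHead (c :: ·)) = c :: pvJoin (x :: xs) := by
  cases xs <;> simp [List.modifyHead, pvJoin]

theorem pvJoin_pvSplit (s : List Char) : pvJoin (pvSplit s) = s := by
  induction s with
  | nil => simp [pvSplit, pvJoin]
  | cons c rest ih =>
    simp only [pvSplit]
    split_ifs with hc
    · subst hc
      cases h : pvSplit rest with
      | nil => exact absurd h (pvSplit_ne_nil rest)
      | cons x xs => rw [← h, show pvJoin ([] :: pvSplit rest) = '.' :: pvJoin (pvSplit rest) from by rw [h]; cases xs <;> simp [pvJoin], ih]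
    · cases h : pvSplit rest with
      | nil => exact absurd h (pvSplit_ne_nil rest)
      | cons x xs => rw [← h, show pvJoin ((pvSplit rest).modifyHead (c :: ·)) = c :: pvJoin (pvSplit rest) from by rw [h]; exact pvJoin_modifyHead c x xs, ih]

-- PySem's splitOn on the single-char separator '.' is pvSplit
theorem pvSplitOn_go (fuel : Nat) (l cur : List Char) (acc : List (List Char))
    (hf : l.length < fuel) :
    PySem.Chars.splitOn.go ['.'] fuel l cur acc
      = acc.reverse ++ (pvSplit l).modifyHead (cur.reverse ++ ·) := by
  induction fuel generalizing l cur acc with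
  | zero => omega
  | succ f ih =>
    cases l with
    | nil =>
      simp [PySem.Chars.splitOn.go, pvSplit, List.modifyHead]
    | cons c rest =>
      rw [show PySem.Chars.splitOn.go ['.'] (f+1) (c :: rest) cur acc
            = if ['.'].isPrefixOf (c :: rest) then PySem.Chars.splitOn.go ['.'] f (List.drop 1 (c :: rest)) [] (cur.reverse :: acc)
              else PySem.Chars.splitOn.go ['.'] f rest (c :: cur) acc from by
        simp [PySem.Chars.splitOn.go]]
      simp only [List.length_cons] at hf
      by_cases hc : c = '.'
      · subst hc
        rw [if_pos (by simp [List.isPrefixOf]), List.drop_one, List.tail_cons]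
        rw [ih _ _ _ (by omega)]
        simp only [pvSplit]
        cases h : pvSplit rest with
        | nil => exact absurd h (pvSplit_ne_nil rest)
        | cons x xs => simp [List.modifyHead_cons]
      · rw [if_neg (by simp [List.isPrefixOf, Ne.symm hc])]
        rw [ih _ _ _ (by omega)]
        simp only [pvSplit, if_neg hc]
        cases h : pvSplit rest with
        | nil => exact absurd h (pvSplit_ne_nil rest)
        | cons x xs => simp [List.modifyHead_cons]

theorem pvSplitOn_eq (s : List Char) : PySem.Chars.splitOn s ['.'] = pvSplit s := by
  rw [PySem.Chars.splitOn, pvSplitOn_go (s.length + 1) s [] [] (by omega)]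
  cases h : pvSplit s with
  | nil => exact absurd h (pvSplit_ne_nil s)
  | cons x xs => simp [List.modifyHead_cons]

theorem pvOfList_inj {a b : List Char} (h : String.ofList a = String.ofList b) : a = b := by
  have := congrArg String.toList h
  simpa using this

theorem pvBeq_ofList (a b : List Char) : (String.ofList a == String.ofList b) = (a == b) := by
  by_cases h : a = b
  · subst h; simp
  · rw [beq_eq_false_iff_ne.mpr (fun e => h (pvOfList_inj e)), beq_eq_false_iff_ne.mpr h]

-- pvLoopA on strings = pvLoopC on their char lists
theorem pvLoopA_eq_pvLoopC (ts us : List (List Char)) :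
    pvLoopA (ts.map String.ofList) (us.map String.ofList) = pvLoopC ts us := by
  induction ts generalizing us with
  | nil => cases us <;> simp [pvLoopA, pvLoopC]
  | cons t ps ih =>
    cases us with
    | nil =>
      simp only [List.map_cons, List.map_nil, pvLoopA, pvLoopC]
      rw [show (">" : String) = String.ofList ['>'] from rfl, pvBeq_ofList]
    | cons u ss =>
      simp only [List.map_cons, pvLoopA, pvLoopC]
      rw [show (">" : String) = String.ofList ['>'] from rfl,
          show ("*" : String) = String.ofList ['*'] from rfl]
      simp only [bne, pvBeq_ofList]
      by_cases h1 : t = ['>']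
      · rw [if_pos (by simp [h1]), if_pos h1]
      · rw [if_neg (by simp [h1]), if_neg h1]
        by_cases h2 : t = ['*']
        · rw [if_neg (by simp [h2]), if_neg (by simp [h2]), ih]
        · by_cases h3 : t = u
          · rw [if_neg (by simp [h3]), if_neg (by simp [h3]), ih]
          · rw [if_pos (by simp [h2, h3]), if_pos ⟨h2, h3⟩]

theorem pvLoopC_self (ts : List (List Char)) : pvLoopC ts ts = true := by
  induction ts with
  | nil => simp [pvLoopC]
  | cons t ps ih =>
    simp only [pvLoopC]
    by_cases h : t = ['>']
    · simp [h]
    · simp [h, ih]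

-- fold preserves all / dead
theorem pvFold_all (cs : List Char) (r : List Char) :
    cs.foldl pvStepB (PvMode.all, r) = (PvMode.all, r) := by
  induction cs with
  | nil => rfl
  | cons c cs ih => simpa [pvStepB] using ih

theorem pvFold_dead (cs : List Char) (r : List Char) :
    cs.foldl pvStepB (PvMode.dead, r) = (PvMode.dead, r) := by
  induction cs with
  | nil => rfl
  | cons c cs ih => simpa [pvStepB] using ih

-- star mode ignores dot-free characters
theorem pvFold_star (cs : List Char) (r : List Char) (h : '.' ∉ cs) :
    cs.foldl pvStepB (PvMode.star, r) = (PvMode.star, r) := by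
  induction cs with
  | nil => rfl
  | cons c cs ih =>
    simp only [List.mem_cons, not_or] at h
    have hc : (c == '.') = false := beq_eq_false_iff_ne.mpr (fun e => h.1 e.symm)
    rw [List.foldl_cons,
      show pvStepB (PvMode.star, r) c = (PvMode.star, r) from by simp [pvStepB, hc]]
    exact ih h.2

-- literal mode run over a dot-free segment
theorem pvFold_lit (u : List Char) (t rest : List Char)
    (hu : '.' ∉ u) (ht : '.' ∉ t) (hrest : rest = [] ∨ ∃ r, rest = '.' :: r) :
    u.foldl pvStepB (PvMode.lit, t ++ rest)
      = if u.isPrefixOf t then (PvMode.lit, t.drop u.length ++ rest) else (PvMode.dead, []) := by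
  induction u generalizing t with
  | nil => simp
  | cons c u' ih =>
    simp only [List.mem_cons, not_or] at hu
    cases t with
    | nil =>
      rw [show ((c :: u').isPrefixOf ([] : List Char)) = false from rfl]
      simp only [Bool.false_eq_true, if_false, List.nil_append, List.foldl_cons]
      rcases hrest with rfl | ⟨r, rfl⟩
      · exact pvFold_dead u' []
      · rw [show pvStepB (PvMode.lit, '.' :: r) c = (PvMode.dead, []) from by
          simp only [pvStepB]
          rw [if_neg (by simp only [beq_iff_eq]; exact hu.1)]]
        exact pvFold_dead u' []
    | cons d t' =>
      simp only [List.mem_cons, not_or] at ht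
      rw [List.cons_append, List.foldl_cons]
      by_cases hd : d = c
      · subst hd
        rw [show pvStepB (PvMode.lit, d :: (t' ++ rest)) d = (PvMode.lit, t' ++ rest) from by
          simp only [pvStepB]
          rw [if_pos (by simp), if_neg (by simp only [beq_iff_eq]; exact fun e => ht.1 e.symm)]]
        rw [ih t' hu.2 ht.2]
        simp [List.isPrefixOf]
      · rw [show pvStepB (PvMode.lit, d :: (t' ++ rest)) c = (PvMode.dead, []) from by
          simp only [pvStepB]
          rw [if_neg (by simp only [beq_iff_eq]; exact hd)]]
        rw [pvFold_dead]
        rw [show ((c :: u').isPrefixOf (d :: t')) = false from by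
          simp [List.isPrefixOf]; exact fun e => absurd e.symm hd]
        simp

-- pvIsGt on a join of dot-free tokens tests the first token
theorem pvIsGt_join (t : List Char) (ts : List (List Char)) (ht : '.' ∉ t) :
    pvIsGt (pvJoin (t :: ts)) = (t == ['>']) := by
  rw [pvJoin_cons]
  cases t with
  | nil => cases ts <;> simp [pvIsGt]
  | cons c t' =>
    cases t' with
    | nil => cases ts <;> simp [pvIsGt]
    | cons d t'' =>
      have hd : (d == '.') = false := beq_eq_false_iff_ne.mpr
        (fun e => ht (by rw [← e]; exact List.mem_cons_of_mem _ List.mem_cons_self))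
      cases ts <;> simp [pvIsGt, hd]

-- pvEnter on a join of dot-free tokens classifies the first token
theorem pvEnter_join (t : List Char) (ts : List (List Char)) (ht : '.' ∉ t) :
    pvEnter (pvJoin (t :: ts))
      = if t = ['>'] then (PvMode.all, [])
        else if t = ['*'] then (PvMode.star, if ts = [] then [] else '.' :: pvJoin ts)
        else (PvMode.lit, pvJoin (t :: ts)) := by
  unfold pvEnter
  rw [pvIsGt_join t ts ht]
  by_cases h1 : t = ['>']
  · rw [if_pos (by simp [h1]), if_pos h1]
  · rw [if_neg (by simp [h1]), if_neg h1]
    rw [pvJoin_cons]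
    by_cases h2 : t = ['*']
    · subst h2
      cases ts <;> simp
    · rw [if_neg h2]
      cases t with
      | nil => cases ts <;> simp
      | cons c t' =>
        by_cases hc : c = '*'
        · subst hc
          cases t' with
          | nil => exact absurd rfl h2
          | cons d t'' =>
            have hd : (d == '.') = false := beq_eq_false_iff_ne.mpr
              (fun e => ht (by rw [← e]; exact List.mem_cons_of_mem _ List.mem_cons_self))
            simp [hd]
        · simp [hc]

-- MAIN: B's automaton over joined tokens computes A's token loop
theorem pvMain (us ts : List (List Char)) (hts : ts ≠ []) (hus : us ≠ [])
    (hdt : ∀ t ∈ ts, '.' ∉ t) (hdu : ∀ u ∈ us, '.' ∉ u) :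
    pvAcceptB ((pvJoin us).foldl pvStepB (pvEnter (pvJoin ts))) = pvLoopC ts us := by
  induction us generalizing ts with
  | nil => exact absurd rfl hus
  | cons u ss ih =>
    obtain ⟨t, ps, rfl⟩ : ∃ t ps, ts = t :: ps := by
      cases ts with
      | nil => exact absurd rfl hts
      | cons a b => exact ⟨a, b, rfl⟩
    have hdt0 : '.' ∉ t := hdt t List.mem_cons_self
    have hdu0 : '.' ∉ u := hdu u List.mem_cons_self
    have hdtps : ∀ x ∈ ps, '.' ∉ x := fun x hx => hdt x (List.mem_cons_of_mem t hx)
    have hduss : ∀ x ∈ ss, '.' ∉ x := fun x hx => hdu x (List.mem_cons_of_mem u hx)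
    rw [pvEnter_join t ps hdt0]
    by_cases h1 : t = ['>']
    · rw [if_pos h1, pvFold_all]
      simp [pvAcceptB, pvLoopC, h1]
    · rw [if_neg h1]
      by_cases h2 : t = ['*']
      · rw [if_pos h2, pvJoin_cons u ss]
        cases ss with
        | nil =>
          rw [if_pos (show ([] : List (List Char)) = [] from rfl)]
          rw [List.append_nil]
          rw [pvFold_star u _ hdu0]
          cases ps with
          | nil =>
            rw [if_pos (show ([] : List (List Char)) = [] from rfl)]
            simp [pvAcceptB, pvLoopC, h2]
          | cons t' ps' =>
            rw [if_neg (show ¬((t' :: ps' : List (List Char)) = []) from by simp)]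
            have hgt := pvIsGt_join t' ps' (hdtps t' List.mem_cons_self)
            simp [pvAcceptB, hgt, pvLoopC, h2]
        | cons s' ss' =>
          rw [if_neg (show ¬((s' :: ss' : List (List Char)) = []) from by simp)]
          rw [List.foldl_append, pvFold_star u _ hdu0]
          cases ps with
          | nil =>
            rw [if_pos (show ([] : List (List Char)) = [] from rfl)]
            rw [List.foldl_cons,
              show pvStepB (PvMode.star, ([] : List Char)) '.' = (PvMode.dead, []) from by
                simp [pvStepB],
              pvFold_dead]
            simp [pvAcceptB, pvLoopC, h2]
          | cons t' ps' =>
            rw [if_neg (show ¬((t' :: ps' : List (List Char)) = []) from by simp)]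
            rw [List.foldl_cons,
              show pvStepB (PvMode.star, '.' :: pvJoin (t' :: ps')) '.' = pvEnter (pvJoin (t' :: ps')) from by
                simp [pvStepB],
              ih (t' :: ps') (by simp) (by simp) hdtps hduss]
            simp [pvLoopC, h2]
      · rw [if_neg h2, pvJoin_cons u ss, pvJoin_cons t ps]
        cases ss with
        | nil =>
          rw [if_pos (show ([] : List (List Char)) = [] from rfl)]
          rw [List.append_nil]
          cases ps with
          | nil =>
            rw [if_pos (show ([] : List (List Char)) = [] from rfl)]
            rw [List.append_nil]
            rw [show (PvMode.lit, t) = (PvMode.lit, t ++ ([] : List Char)) from by simp,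
              pvFold_lit u t [] hdu0 hdt0 (Or.inl rfl)]
            by_cases hp : u.isPrefixOf t
            · rw [if_pos hp]
              by_cases hut : u = t
              · subst hut
                rw [List.drop_length]
                simp [pvAcceptB, pvLoopC, h1]
              · have hp' : u <+: t := List.isPrefixOf_iff_prefix.mp hp
                have hlt : u.length < t.length :=
                  lt_of_le_of_ne (List.IsPrefix.length_le hp')
                    (fun h => hut (List.IsPrefix.eq_of_length hp' h))
                have htu : ¬ t = u := fun e => hut e.symm
                cases hdrop : t.drop u.length with
                | nil => exact absurd (List.drop_eq_nil_iff.mp hdrop) (by omega)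
                | cons d tt =>
                  have hdmem : d ∈ t := by
                    have h' : d ∈ t.drop u.length := by rw [hdrop]; exact List.mem_cons_self
                    exact List.mem_of_mem_drop h'
                  have hdne : (d == '.') = false := beq_eq_false_iff_ne.mpr
                    (fun e => hdt0 (e ▸ hdmem))
                  simp [pvAcceptB, hdne, pvLoopC, h1, h2, htu]
            · rw [if_neg hp]
              have htu : ¬ t = u := fun e =>
                hp (by rw [e]; exact List.isPrefixOf_iff_prefix.mpr List.prefix_rfl)
              simp [pvAcceptB, pvLoopC, h1, h2, htu]
          | cons t' ps' =>
            rw [if_neg (show ¬((t' :: ps' : List (List Char)) = []) from by simp)]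
            rw [pvFold_lit u t ('.' :: pvJoin (t' :: ps')) hdu0 hdt0 (Or.inr ⟨_, rfl⟩)]
            by_cases hp : u.isPrefixOf t
            · rw [if_pos hp]
              by_cases hut : u = t
              · subst hut
                rw [List.drop_length]
                have hgt := pvIsGt_join t' ps' (hdtps t' List.mem_cons_self)
                simp [pvAcceptB, hgt, pvLoopC, h1]
              · have hp' : u <+: t := List.isPrefixOf_iff_prefix.mp hp
                have hlt : u.length < t.length :=
                  lt_of_le_of_ne (List.IsPrefix.length_le hp')
                    (fun h => hut (List.IsPrefix.eq_of_length hp' h))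
                have htu : ¬ t = u := fun e => hut e.symm
                cases hdrop : t.drop u.length with
                | nil => exact absurd (List.drop_eq_nil_iff.mp hdrop) (by omega)
                | cons d tt =>
                  have hdmem : d ∈ t := by
                    have h' : d ∈ t.drop u.length := by rw [hdrop]; exact List.mem_cons_self
                    exact List.mem_of_mem_drop h'
                  have hdne : (d == '.') = false := beq_eq_false_iff_ne.mpr
                    (fun e => hdt0 (e ▸ hdmem))
                  simp [pvAcceptB, List.cons_append, hdne, pvLoopC, h1, h2, htu]
            · rw [if_neg hp]
              have htu : ¬ t = u := fun e =>
                hp (by rw [e]; exact List.isPrefixOf_iff_prefix.mpr List.prefix_rfl)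
              simp [pvAcceptB, pvLoopC, h1, h2, htu]
        | cons s' ss' =>
          rw [if_neg (show ¬((s' :: ss' : List (List Char)) = []) from by simp)]
          rw [List.foldl_append]
          cases ps with
          | nil =>
            rw [if_pos (show ([] : List (List Char)) = [] from rfl)]
            rw [List.append_nil]
            rw [show (PvMode.lit, t) = (PvMode.lit, t ++ ([] : List Char)) from by simp,
              pvFold_lit u t [] hdu0 hdt0 (Or.inl rfl)]
            by_cases hp : u.isPrefixOf t
            · rw [if_pos hp]
              by_cases hut : u = t
              · subst hut
                rw [List.drop_length]
                rw [List.nil_append, List.foldl_cons,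
                  show pvStepB (PvMode.lit, ([] : List Char)) '.' = (PvMode.dead, []) from by
                    simp [pvStepB],
                  pvFold_dead]
                simp [pvAcceptB, pvLoopC, h1, h2]
              · have hp' : u <+: t := List.isPrefixOf_iff_prefix.mp hp
                have hlt : u.length < t.length :=
                  lt_of_le_of_ne (List.IsPrefix.length_le hp')
                    (fun h => hut (List.IsPrefix.eq_of_length hp' h))
                have htu : ¬ t = u := fun e => hut e.symm
                cases hdrop : t.drop u.length with
                | nil => exact absurd (List.drop_eq_nil_iff.mp hdrop) (by omega)
                | cons d tt =>
                  have hdmem : d ∈ t := by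
                    have h' : d ∈ t.drop u.length := by rw [hdrop]; exact List.mem_cons_self
                    exact List.mem_of_mem_drop h'
                  have hdne : (d == '.') = false := beq_eq_false_iff_ne.mpr
                    (fun e => hdt0 (e ▸ hdmem))
                  rw [List.append_nil, List.foldl_cons,
                    show pvStepB (PvMode.lit, d :: tt) '.' = (PvMode.dead, []) from by
                      simp only [pvStepB]
                      rw [if_neg (by simp [hdne])],
                    pvFold_dead]
                  simp [pvAcceptB, pvLoopC, h1, h2, htu]
            · rw [if_neg hp, pvFold_dead]
              have htu : ¬ t = u := fun e =>
                hp (by rw [e]; exact List.isPrefixOf_iff_prefix.mpr List.prefix_rfl)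
              simp [pvAcceptB, pvLoopC, h1, h2, htu]
          | cons t' ps' =>
            rw [if_neg (show ¬((t' :: ps' : List (List Char)) = []) from by simp)]
            rw [pvFold_lit u t ('.' :: pvJoin (t' :: ps')) hdu0 hdt0 (Or.inr ⟨_, rfl⟩)]
            by_cases hp : u.isPrefixOf t
            · rw [if_pos hp]
              by_cases hut : u = t
              · subst hut
                rw [List.drop_length]
                rw [List.nil_append, List.foldl_cons,
                  show pvStepB (PvMode.lit, '.' :: pvJoin (t' :: ps')) '.' = pvEnter (pvJoin (t' :: ps')) from by
                    simp [pvStepB],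
                  ih (t' :: ps') (by simp) (by simp) hdtps hduss]
                simp [pvLoopC, h1]
              · have hp' : u <+: t := List.isPrefixOf_iff_prefix.mp hp
                have hlt : u.length < t.length :=
                  lt_of_le_of_ne (List.IsPrefix.length_le hp')
                    (fun h => hut (List.IsPrefix.eq_of_length hp' h))
                have htu : ¬ t = u := fun e => hut e.symm
                cases hdrop : t.drop u.length with
                | nil => exact absurd (List.drop_eq_nil_iff.mp hdrop) (by omega)
                | cons d tt =>
                  have hdmem : d ∈ t := by
                    have h' : d ∈ t.drop u.length := by rw [hdrop]; exact List.mem_cons_self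
                    exact List.mem_of_mem_drop h'
                  have hdne : (d == '.') = false := beq_eq_false_iff_ne.mpr
                    (fun e => hdt0 (e ▸ hdmem))
                  rw [List.cons_append, List.foldl_cons,
                    show pvStepB (PvMode.lit, d :: (tt ++ '.' :: pvJoin (t' :: ps'))) '.' = (PvMode.dead, []) from by
                      simp only [pvStepB]
                      rw [if_neg (by simp [hdne])],
                    pvFold_dead]
                  simp [pvAcceptB, pvLoopC, h1, h2, htu]
            · rw [if_neg hp, pvFold_dead]
              have htu : ¬ t = u := fun e =>
                hp (by rw [e]; exact List.isPrefixOf_iff_prefix.mpr List.prefix_rfl)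
              simp [pvAcceptB, pvLoopC, h1, h2, htu]

-- .split(".") is pvSplit, token by token
theorem pvSplit?_getD (x : String) :
    (PySem.Str.split? x ".").getD [] = (pvSplit x.toList).map String.ofList := by
  rw [PySem.Str.split?]
  rw [show ("." : String).toList = ['.'] from rfl]
  rw [PySem.Chars.split?]
  simp [pvSplitOn_eq]

-- ===== VERDICT (by name: the statement is the Claim_ definition above) =====
theorem subject_matches_spec : Claim_equal_subject_matches := by
  intro pattern subject _
  unfold Spec_subject_matches subject_matches subject_matches_alt
  simp only []
  split_ifs with h1 h2
  · rfl
  · have he : PySem.Str.strip pattern = PySem.Str.strip subject := eq_of_beq h2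
    rw [he]
    conv_rhs => rw [← pvJoin_pvSplit (PySem.Str.strip subject).toList]
    rw [pvMain _ _ (pvSplit_ne_nil _) (pvSplit_ne_nil _) (pvSplit_dotfree _) (pvSplit_dotfree _),
      pvLoopC_self]
  · rw [pvSplit?_getD, pvSplit?_getD, pvLoopA_eq_pvLoopC]
    conv_rhs => rw [← pvJoin_pvSplit (PySem.Str.strip subject).toList,
      ← pvJoin_pvSplit (PySem.Str.strip pattern).toList]
    exact (pvMain _ _ (pvSplit_ne_nil _) (pvSplit_ne_nil _) (pvSplit_dotfree _) (pvSplit_dotfree _)).symm
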